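-- pv_equiv track=rewrite | github.com/dylan-bialade/assistantia | app/services/startup_indexer.py | _diff_index
-- ===== SOURCE A (Python) =====
-- from typing import Dict, Any, List, Tuple, Iterable
--
-- def _diff_index(old: Dict[str, Dict[str, Any]], new: Dict[str, Dict[str, Any]]):
--     """
--     Calcule added/removed/changed entre deux index (clés = chemins POSIX).
--     """
--     old_keys = set(old.keys())
--     new_keys = set(new.keys())
--
--     added = sorted(new_keys - old_keys)
--     removed = sorted(old_keys - new_keys)
--
--     changed: List[str] = []
--     common = old_keys & new_keys
--     for k in common:
--         if old[k].get("hash") != new[k].get("hash"):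
--             changed.append(k)
--
--     return {
--         "added": added,
--         "removed": removed,
--         "changed": sorted(changed),
--     }
-- ===== SOURCE B (Python) =====
-- from typing import Dict, Any, List
--
--
-- def _diff_index(old: Dict[str, Dict[str, Any]], new: Dict[str, Dict[str, Any]]):
--     """
--     Calcule added/removed/changed entre deux index (clés = chemins POSIX).
--
--     Merge of the two key-sorted item lists with two pointers: each output list
--     is emitted already in sorted order, so no set algebra and no final sort of
--     the diff lists is needed.
--     """
--     olds = sorted(old.items(), key=lambda kv: kv[0])
--     news = sorted(new.items(), key=lambda kv: kv[0])
--     added: List[str] = []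
--     removed: List[str] = []
--     changed: List[str] = []
--     i = j = 0
--     while i < len(olds) and j < len(news):
--         ko, vo = olds[i]
--         kn, vn = news[j]
--         if ko == kn:
--             if vo.get("hash") != vn.get("hash"):
--                 changed.append(ko)
--             i += 1
--             j += 1
--         elif ko < kn:
--             removed.append(ko)
--             i += 1
--         else:
--             added.append(kn)
--             j += 1
--     removed.extend(kv[0] for kv in olds[i:])
--     added.extend(kv[0] for kv in news[j:])
--     return {"added": added, "removed": removed, "changed": changed}
-- ===== Notes on version B (the rewrite author's own statement) =====
-- stated objective: alternative
-- what changed: Replaces A's set algebra (key sets, differences, intersection, per-key dict lookups, then sorting each result) by sorting the two item lists by key once and computing added/removed/changed in a single two-pointer merge that emits each list already in sorted order, with no membership tests and no final sorts.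
import Mathlib
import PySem

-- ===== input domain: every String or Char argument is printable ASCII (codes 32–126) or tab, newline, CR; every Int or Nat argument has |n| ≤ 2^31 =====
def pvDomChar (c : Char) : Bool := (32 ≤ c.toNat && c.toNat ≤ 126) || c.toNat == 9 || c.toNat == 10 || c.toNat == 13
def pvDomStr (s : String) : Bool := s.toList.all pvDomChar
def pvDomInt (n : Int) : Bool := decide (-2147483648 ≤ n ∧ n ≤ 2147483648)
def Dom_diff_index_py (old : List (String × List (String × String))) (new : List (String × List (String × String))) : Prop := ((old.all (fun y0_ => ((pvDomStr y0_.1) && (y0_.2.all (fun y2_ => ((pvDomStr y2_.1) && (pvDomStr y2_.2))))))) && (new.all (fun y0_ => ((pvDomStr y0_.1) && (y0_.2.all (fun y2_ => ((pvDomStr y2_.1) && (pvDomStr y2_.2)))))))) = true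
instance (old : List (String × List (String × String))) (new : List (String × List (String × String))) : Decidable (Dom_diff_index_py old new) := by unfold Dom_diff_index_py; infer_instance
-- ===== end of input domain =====

-- B replaces A's set-algebra diff by a two-pointer merge of the two key-sorted item lists (alternative decomposition; same result).


-- ===== PORT A =====
-- shared tiny helper: v.get("hash") on an inner dict (used by both ports)
def pvGetHash (v : List (String × String)) : Option String :=
  (PySem.Dict.ofList v).get? "hash"

-- literal port of A: key sets, set differences/intersection, loop over the intersection.
-- old[k] inside the loop is ported as getD k [] — exact because k ∈ common means k is a key of both dicts.
-- the loop iterates a Python set; its result is only used after sorted(), so iteration order cannot matter.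
def diff_index_py (old : List (String × List (String × String))) (new : List (String × List (String × String))) : List (String × List String) :=
  let oldD : PySem.Dict String (List (String × String)) := PySem.Dict.ofList old
  let newD : PySem.Dict String (List (String × String)) := PySem.Dict.ofList new
  let old_keys : PySem.Set String := PySem.Set.ofList (PySem.Dict.keys oldD)
  let new_keys : PySem.Set String := PySem.Set.ofList (PySem.Dict.keys newD)
  let added := PySem.List.sorted (PySem.Set.diff new_keys old_keys) (fun x => x) false
  let removed := PySem.List.sorted (PySem.Set.diff old_keys new_keys) (fun x => x) false
  let common := PySem.Set.inter old_keys new_keys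
  let changed := common.foldl (fun acc k =>
      if pvGetHash (oldD.getD k []) ≠ pvGetHash (newD.getD k []) then acc ++ [k] else acc) []
  [("added", added), ("removed", removed), ("changed", PySem.List.sorted changed (fun x => x) false)]

-- ===== PORT B =====
-- the while-loop of Source B: structural two-pointer merge of the two key-sorted item lists,
-- together with the trailing removed.extend(olds[i:]) / added.extend(news[j:]).
-- result: (added, (removed, changed)), each emitted in merge order.
def pvMerge : List (String × List (String × String)) → List (String × List (String × String)) →
    List String × (List String × List String)
  | [], ns => (ns.map Prod.fst, ([], []))
  | o :: os, [] => ([], ((o :: os).map Prod.fst, []))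
  | (ko, vo) :: os, (kn, vn) :: ns =>
      if ko = kn then
        let r := pvMerge os ns
        (r.1, (r.2.1, if pvGetHash vo ≠ pvGetHash vn then ko :: r.2.2 else r.2.2))
      else if ko < kn then
        let r := pvMerge os ((kn, vn) :: ns)
        (r.1, (ko :: r.2.1, r.2.2))
      else
        let r := pvMerge ((ko, vo) :: os) ns
        (kn :: r.1, (r.2.1, r.2.2))
  termination_by os ns => os.length + ns.length

-- literal port of Source B: sort both item lists by key once, then merge.
def diff_index_py_alt (old : List (String × List (String × String))) (new : List (String × List (String × String))) : List (String × List String) :=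
  let olds := PySem.List.sorted (PySem.Dict.ofList old).items Prod.fst false
  let news := PySem.List.sorted (PySem.Dict.ofList new).items Prod.fst false
  let r := pvMerge olds news
  [("added", r.1), ("removed", r.2.1), ("changed", r.2.2)]

-- ===== PRECONDITION & SPEC =====
def Spec_diff_index_py (old : List (String × List (String × String))) (new : List (String × List (String × String))) (out : List (String × List String)) : Prop := out = diff_index_py_alt old new
instance (old : List (String × List (String × String))) (new : List (String × List (String × String))) (out : List (String × List String)) : Decidable (Spec_diff_index_py old new out) := by unfold Spec_diff_index_py; infer_instance

-- ===== CLAIM (what is proved, stated in full; the proofs are below) =====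
def Claim_equal_diff_index_py : Prop := ∀ (old : List (String × List (String × String))) (new : List (String × List (String × String))), Dom_diff_index_py old new → Spec_diff_index_py old new (diff_index_py old new)

-- ===== LEMMAS AND PROOFS =====

-- canonical value both ports are reduced to: each diff list as sorted(filter …)
def pvCanon (old : List (String × List (String × String))) (new : List (String × List (String × String))) : List (String × List String) :=
  let oldD : PySem.Dict String (List (String × String)) := PySem.Dict.ofList old
  let newD : PySem.Dict String (List (String × String)) := PySem.Dict.ofList new
  [("added", PySem.List.sorted ((newD.items.filter (fun kv => !(oldD.contains kv.1))).map Prod.fst) (fun x => x) false),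
   ("removed", PySem.List.sorted ((PySem.Dict.keys oldD).filter (fun k => !(newD.contains k))) (fun x => x) false),
   ("changed", PySem.List.sorted ((newD.items.filter (fun kv => oldD.contains kv.1 && decide (pvGetHash (oldD.getD kv.1 []) ≠ pvGetHash kv.2))).map Prod.fst) (fun x => x) false)]

lemma contains_keys_eq {ν : Type} (d : PySem.Dict String ν) (k : String) :
    PySem.Set.contains (PySem.Dict.keys d) k = PySem.Dict.contains d k := by
  simp [PySem.Set.contains_eq_listContains, PySem.Dict.contains_eq_decide_mem_keys]

lemma changed_sorted_eq (oldD newD : PySem.Dict String (List (String × String)))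
    (h1 : (PySem.Dict.keys oldD).Nodup) (h2 : (PySem.Dict.keys newD).Nodup) :
    PySem.List.sorted (((PySem.Dict.keys oldD).filter (fun k => PySem.Set.contains (PySem.Dict.keys newD) k)).filter
        (fun k => decide (pvGetHash (oldD.getD k []) ≠ pvGetHash (newD.getD k [])))) (fun x => x) false
  = PySem.List.sorted ((newD.items.filter
        (fun kv => oldD.contains kv.1 && decide (pvGetHash (oldD.getD kv.1 []) ≠ pvGetHash kv.2))).map Prod.fst) (fun x => x) false := by
  apply PySem.List.sorted_eq_sorted_of_perm _ _ _ (fun a b hab => hab)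
  rw [List.perm_ext_iff_of_nodup ((h1.filter _).filter _)]
  · intro x
    constructor
    · intro hx
      have hx1 := List.of_mem_filter hx
      have hx2 := List.mem_of_mem_filter hx
      have hxc := List.of_mem_filter hx2
      have hxo := List.mem_of_mem_filter hx2
      have hxn : x ∈ PySem.Dict.keys newD := by
        have := PySem.Set.contains_iff (s := PySem.Dict.keys newD) (x := x)
        exact this.1 hxc
      obtain ⟨⟨k, v⟩, hkv, hfst⟩ := List.mem_map.1 hxn
      refine List.mem_map.2 ⟨(k, v), List.mem_filter.2 ⟨hkv, ?_⟩, hfst⟩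
      have hget : newD.getD (k, v).1 [] = v := by
        exact PySem.Dict.getD_of_mem_items _ hkv h2 []
      have hco : oldD.contains k = true := by
        rw [PySem.Dict.contains_eq_decide_mem_keys]; subst hfst; exact decide_eq_true hxo
      rw [hco]
      simp only [Bool.true_and]
      subst hfst
      rw [hget] at hx1
      exact hx1
    · intro hx
      obtain ⟨⟨k, v⟩, hkv, hfst⟩ := List.mem_map.1 hx
      have hkv1 := List.mem_of_mem_filter hkv
      have hp := List.of_mem_filter hkv
      have hco : oldD.contains k = true := by
        cases h : oldD.contains k
        · rw [h] at hp; simp at hp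
        · rfl
      have hq : pvGetHash (oldD.getD k []) ≠ pvGetHash v := by
        rw [hco] at hp; simpa using hp
      have hget : newD.getD k [] = v := PySem.Dict.getD_of_mem_items _ hkv1 h2 []
      have hxn : k ∈ PySem.Dict.keys newD := List.mem_map.2 ⟨(k, v), hkv1, rfl⟩
      have hxo : k ∈ PySem.Dict.keys oldD := by
        rw [PySem.Dict.contains_eq_decide_mem_keys] at hco
        exact of_decide_eq_true hco
      subst hfst
      refine List.mem_filter.2 ⟨List.mem_filter.2 ⟨hxo, ?_⟩, ?_⟩
      · exact (PySem.Set.contains_iff _ _).2 hxn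
      · rw [hget]; exact decide_eq_true hq
  · exact h2.sublist ((List.filter_sublist.map Prod.fst))

-- A equals the canonical value
lemma a_eq_canon (old new : List (String × List (String × String))) :
    diff_index_py old new = pvCanon old new := by
  unfold diff_index_py pvCanon
  simp only []
  have h1 : (PySem.Dict.keys (PySem.Dict.ofList old)).Nodup := PySem.Dict.nodup_keys_ofList _
  have h2 : (PySem.Dict.keys (PySem.Dict.ofList new)).Nodup := PySem.Dict.nodup_keys_ofList _
  rw [PySem.Set.ofList_eq_self_of_nodup _ h1, PySem.Set.ofList_eq_self_of_nodup _ h2]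
  have hkeys : ∀ (d : PySem.Dict String (List (String × String))), PySem.Dict.keys d = d.items.map Prod.fst := fun _ => rfl
  have ha : List.filter (fun x => !PySem.Set.contains (PySem.Dict.keys (PySem.Dict.ofList old)) x) (PySem.Dict.keys (PySem.Dict.ofList new))
      = (List.filter (fun kv => !(PySem.Dict.ofList old).contains kv.1) (PySem.Dict.ofList new).items).map Prod.fst := by
    simp only [contains_keys_eq]
    rw [hkeys (PySem.Dict.ofList new), List.filter_map]
    rfl
  have hr : List.filter (fun x => !PySem.Set.contains (PySem.Dict.keys (PySem.Dict.ofList new)) x) (PySem.Dict.keys (PySem.Dict.ofList old))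
      = List.filter (fun k => !(PySem.Dict.ofList new).contains k) (PySem.Dict.keys (PySem.Dict.ofList old)) := by
    simp only [contains_keys_eq]
  have hc : PySem.List.sorted (List.foldl (fun acc k =>
        if pvGetHash ((PySem.Dict.ofList old).getD k []) ≠ pvGetHash ((PySem.Dict.ofList new).getD k []) then acc ++ [k] else acc) []
        (List.filter (fun x => PySem.Set.contains (PySem.Dict.keys (PySem.Dict.ofList new)) x) (PySem.Dict.keys (PySem.Dict.ofList old)))) (fun x => x) false
      = PySem.List.sorted ((List.filter (fun kv => (PySem.Dict.ofList old).contains kv.1 && decide (pvGetHash ((PySem.Dict.ofList old).getD kv.1 []) ≠ pvGetHash kv.2)) (PySem.Dict.ofList new).items).map Prod.fst) (fun x => x) false := by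
    rw [PySem.List.foldl_append_ite_eq_filter]
    simpa using changed_sorted_eq (PySem.Dict.ofList old) (PySem.Dict.ofList new) h1 h2
  simp only [PySem.Set.diff, PySem.Set.inter]
  rw [ha, hr, hc]

-- List.lookup through a permutation with distinct keys
lemma lookup_eq_some_iff {β : Type} (l : List (String × β)) (x : String) (v : β)
    (h : (l.map Prod.fst).Nodup) : List.lookup x l = some v ↔ (x, v) ∈ l := by
  induction l with
  | nil => simp
  | cons p t ih =>
    obtain ⟨k, w⟩ := p
    simp only [List.map_cons, List.nodup_cons] at h
    by_cases hk : x = k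
    · subst hk
      simp only [List.lookup_cons, beq_self_eq_true]
      constructor
      · rintro h'; simp at h'; subst h'; simp
      · intro hm
        rcases List.mem_cons.1 hm with h' | h'
        · simp at h'; simp [h']
        · exact absurd (List.mem_map.2 ⟨(x, v), h', rfl⟩) h.1
    · have : ((x == k) = false) := beq_eq_false_iff_ne.2 hk
      simp only [List.lookup_cons, this]
      rw [ih h.2]
      constructor
      · exact fun h' => List.mem_cons_of_mem _ h'
      · intro hm
        rcases List.mem_cons.1 hm with h' | h'
        · exact absurd (congrArg Prod.fst h') hk
        · exact h'

lemma lookup_none {β : Type} (l : List (String × β)) (x : String)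
    (h : ∀ kv ∈ l, x ≠ kv.1) : List.lookup x l = none := by
  induction l with
  | nil => simp
  | cons p t ih =>
    cases p with
    | mk pk pv =>
      have hb : (x == pk) = false := beq_eq_false_iff_ne.2 (by simpa using h (pk, pv) List.mem_cons_self)
      simp only [List.lookup_cons, hb]
      exact ih (fun kv hm => h kv (List.mem_cons_of_mem _ hm))


-- the merge computes the three diff lists as filters over its (key-sorted, key-distinct) inputs
lemma pvMerge_spec (os ns : List (String × List (String × String)))
    (ho : os.Pairwise (fun a b => a.1 < b.1)) (hn : ns.Pairwise (fun a b => a.1 < b.1)) :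
    pvMerge os ns =
      ((ns.filter (fun kv => !decide (kv.1 ∈ os.map Prod.fst))).map Prod.fst,
       ((os.filter (fun kv => !decide (kv.1 ∈ ns.map Prod.fst))).map Prod.fst,
        (ns.filter (fun kv => ((List.lookup kv.1 os).map
            (fun vo => decide (pvGetHash vo ≠ pvGetHash kv.2))).getD false)).map Prod.fst)) := by
  fun_induction pvMerge os ns with
  | case1 ns =>
    simp
  | case2 o os =>
    simp
  | case3 vo os kn vn ns h ih =>
    have hko : ∀ kv ∈ os, kn < kv.1 := (List.pairwise_cons.1 ho).1
    have hkn : ∀ kv ∈ ns, kn < kv.1 := (List.pairwise_cons.1 hn).1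
    have hh : h = _ := ih (List.pairwise_cons.1 ho).2 (List.pairwise_cons.1 hn).2
    rw [hh]
    have t1 : List.filter (fun kv => !decide (kv.1 ∈ List.map Prod.fst ((kn, vo) :: os))) ((kn, vn) :: ns)
        = List.filter (fun kv => !decide (kv.1 ∈ List.map Prod.fst os)) ns := by
      rw [List.filter_cons, if_neg (by simp)]
      exact List.filter_congr (fun kv hm => by
        have := (hkn kv hm).ne'
        simp [this])
    have t2 : List.filter (fun kv => !decide (kv.1 ∈ List.map Prod.fst ((kn, vn) :: ns))) ((kn, vo) :: os)
        = List.filter (fun kv => !decide (kv.1 ∈ List.map Prod.fst ns)) os := by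
      rw [List.filter_cons, if_neg (by simp)]
      exact List.filter_congr (fun kv hm => by
        have := (hko kv hm).ne'
        simp [this])
    have t3 : List.filter (fun kv => ((List.lookup kv.1 ((kn, vo) :: os)).map
            (fun w => decide (pvGetHash w ≠ pvGetHash kv.2))).getD false) ((kn, vn) :: ns)
        = (if pvGetHash vo ≠ pvGetHash vn then ((kn, vn) : String × List (String × String)) :: List.filter (fun kv => ((List.lookup kv.1 os).map
            (fun w => decide (pvGetHash w ≠ pvGetHash kv.2))).getD false) ns
           else List.filter (fun kv => ((List.lookup kv.1 os).map
            (fun w => decide (pvGetHash w ≠ pvGetHash kv.2))).getD false) ns) := by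
      rw [List.filter_cons]
      have htail : List.filter (fun kv => ((List.lookup kv.1 ((kn, vo) :: os)).map
            (fun w => decide (pvGetHash w ≠ pvGetHash kv.2))).getD false) ns
          = List.filter (fun kv => ((List.lookup kv.1 os).map
            (fun w => decide (pvGetHash w ≠ pvGetHash kv.2))).getD false) ns :=
        List.filter_congr (fun kv hm => by
          have hne : (kv.1 == kn) = false := beq_eq_false_iff_ne.2 (hkn kv hm).ne'
          simp [List.lookup_cons, hne])
      rw [htail]
      by_cases hc : pvGetHash vo ≠ pvGetHash vn
      · rw [if_pos hc, if_pos (by simp [hc])]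
      · rw [if_neg hc, if_neg (by simp; simpa using not_not.1 hc)]
    rw [t1, t2, t3]
    by_cases hc : pvGetHash vo ≠ pvGetHash vn
    · simp [hc]
    · simp [hc]
  | case4 ko vo os kn vn ns hne hlt h ih =>
    have hko : ∀ kv ∈ os, ko < kv.1 := (List.pairwise_cons.1 ho).1
    have hkn : ∀ kv ∈ ns, kn < kv.1 := (List.pairwise_cons.1 hn).1
    have hh : h = _ := ih (List.pairwise_cons.1 ho).2 hn
    rw [hh]
    have hnotin : ko ∉ List.map Prod.fst ((kn, vn) :: ns) := by
      simp only [List.map_cons, List.mem_cons]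
      rintro (rfl | hm)
      · exact hne rfl
      · obtain ⟨kv, hkv, rfl⟩ := List.mem_map.1 hm
        exact absurd (hkn kv hkv) (by exact fun hlt' => lt_asymm hlt hlt')
    have t1 : List.filter (fun kv => !decide (kv.1 ∈ List.map Prod.fst ((ko, vo) :: os))) ((kn, vn) :: ns)
        = List.filter (fun kv => !decide (kv.1 ∈ List.map Prod.fst os)) ((kn, vn) :: ns) :=
      List.filter_congr (fun kv hm => by
        have hk : ko < kv.1 := by
          rcases List.mem_cons.1 hm with rfl | hm'
          · exact hlt
          · exact lt_trans hlt (hkn kv hm')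
        simp [hk.ne'])
    have t2 : List.filter (fun kv => !decide (kv.1 ∈ List.map Prod.fst ((kn, vn) :: ns))) ((ko, vo) :: os)
        = (ko, vo) :: List.filter (fun kv => !decide (kv.1 ∈ List.map Prod.fst ((kn, vn) :: ns))) os := by
      rw [List.filter_cons, if_pos (by simpa using hnotin)]
    have t3 : List.filter (fun kv => ((List.lookup kv.1 ((ko, vo) :: os)).map
            (fun w => decide (pvGetHash w ≠ pvGetHash kv.2))).getD false) ((kn, vn) :: ns)
        = List.filter (fun kv => ((List.lookup kv.1 os).map
            (fun w => decide (pvGetHash w ≠ pvGetHash kv.2))).getD false) ((kn, vn) :: ns) :=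
      List.filter_congr (fun kv hm => by
        have hk : ko < kv.1 := by
          rcases List.mem_cons.1 hm with rfl | hm'
          · exact hlt
          · exact lt_trans hlt (hkn kv hm')
        have hne' : (kv.1 == ko) = false := beq_eq_false_iff_ne.2 hk.ne'
        simp [List.lookup_cons, hne'])
    rw [t1, t2, t3]
    simp
  | case5 ko vo os kn vn ns hne hnlt h ih =>
    have hko : ∀ kv ∈ os, ko < kv.1 := (List.pairwise_cons.1 ho).1
    have hkn : ∀ kv ∈ ns, kn < kv.1 := (List.pairwise_cons.1 hn).1
    have hlt : kn < ko := lt_of_le_of_ne (not_lt.1 hnlt) (fun h' => hne h'.symm)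
    have hh : h = _ := ih ho (List.pairwise_cons.1 hn).2
    rw [hh]
    have hnotin : kn ∉ List.map Prod.fst ((ko, vo) :: os) := by
      simp only [List.map_cons, List.mem_cons]
      rintro (rfl | hm)
      · exact hne rfl
      · obtain ⟨kv, hkv, rfl⟩ := List.mem_map.1 hm
        exact absurd (hko kv hkv) (lt_asymm hlt)
    have t1 : List.filter (fun kv => !decide (kv.1 ∈ List.map Prod.fst ((ko, vo) :: os))) ((kn, vn) :: ns)
        = (kn, vn) :: List.filter (fun kv => !decide (kv.1 ∈ List.map Prod.fst ((ko, vo) :: os))) ns := by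
      rw [List.filter_cons, if_pos (by simpa using hnotin)]
    have t2 : List.filter (fun kv => !decide (kv.1 ∈ List.map Prod.fst ((kn, vn) :: ns))) ((ko, vo) :: os)
        = List.filter (fun kv => !decide (kv.1 ∈ List.map Prod.fst ns)) ((ko, vo) :: os) :=
      List.filter_congr (fun kv hm => by
        have hk : kn < kv.1 := by
          rcases List.mem_cons.1 hm with rfl | hm'
          · exact hlt
          · exact lt_trans hlt (hko kv hm')
        simp [hk.ne'])
    have hlook : List.lookup kn ((ko, vo) :: os) = none :=
      lookup_none _ _ (by
        intro kv hm
        rcases List.mem_cons.1 hm with rfl | hm'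
        · exact hlt.ne
        · exact (lt_trans hlt (hko kv hm')).ne)
    have t3 : List.filter (fun kv => ((List.lookup kv.1 ((ko, vo) :: os)).map
            (fun w => decide (pvGetHash w ≠ pvGetHash kv.2))).getD false) ((kn, vn) :: ns)
        = List.filter (fun kv => ((List.lookup kv.1 ((ko, vo) :: os)).map
            (fun w => decide (pvGetHash w ≠ pvGetHash kv.2))).getD false) ns := by
      rw [List.filter_cons, if_neg (by simp [hlook])]
    rw [t1, t2, t3]
    simp

lemma pairwise_lt_of_sorted_items (d : PySem.Dict String (List (String × String))) (hk : d.keys.Nodup) :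
    (PySem.List.sorted d.items Prod.fst false).Pairwise (fun a b => a.1 < b.1) := by
  have hperm : (PySem.List.sorted d.items Prod.fst false).Perm d.items := PySem.List.sorted_perm _ _ _
  have hnd : ((PySem.List.sorted d.items Prod.fst false).map Prod.fst).Nodup := by
    exact ((hperm.map Prod.fst).nodup_iff).2 hk
  have hle : (PySem.List.sorted d.items Prod.fst false).Pairwise (fun a b => a.1 ≤ b.1) :=
    PySem.List.sorted_pairwise _ _
  have hne : (PySem.List.sorted d.items Prod.fst false).Pairwise (fun a b => a.1 ≠ b.1) :=
    List.pairwise_map.1 hnd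
  exact (hle.and hne).imp (fun h => lt_of_le_of_ne h.1 h.2)

-- B equals the canonical value
lemma b_eq_canon (old new : List (String × List (String × String))) :
    diff_index_py_alt old new = pvCanon old new := by
  unfold diff_index_py_alt pvCanon
  simp only []
  have h1 : (PySem.Dict.keys (PySem.Dict.ofList old)).Nodup := PySem.Dict.nodup_keys_ofList _
  have h2 : (PySem.Dict.keys (PySem.Dict.ofList new)).Nodup := PySem.Dict.nodup_keys_ofList _
  have ho := pairwise_lt_of_sorted_items (PySem.Dict.ofList old) h1
  have hn := pairwise_lt_of_sorted_items (PySem.Dict.ofList new) h2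
  rw [pvMerge_spec _ _ ho hn]
  set oldD := PySem.Dict.ofList old with hoD
  set newD := PySem.Dict.ofList new with hnD
  set olds := PySem.List.sorted oldD.items Prod.fst false with holds
  set news := PySem.List.sorted newD.items Prod.fst false with hnews
  have hpo : olds.Perm oldD.items := PySem.List.sorted_perm _ _ _
  have hpn : news.Perm newD.items := PySem.List.sorted_perm _ _ _
  have hmo : ∀ x : String, (x ∈ olds.map Prod.fst) ↔ x ∈ oldD.keys := fun x => (hpo.map Prod.fst).mem_iff
  have hmn : ∀ x : String, (x ∈ news.map Prod.fst) ↔ x ∈ newD.keys := fun x => (hpn.map Prod.fst).mem_iff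
  have hnodup_o : (olds.map Prod.fst).Nodup := ((hpo.map Prod.fst).nodup_iff).2 h1
  -- added
  have e1 : (news.filter (fun kv => !decide (kv.1 ∈ olds.map Prod.fst))).map Prod.fst
      = PySem.List.sorted ((newD.items.filter (fun kv => !(oldD.contains kv.1))).map Prod.fst) (fun x => x) false := by
    have hpq : news.filter (fun kv => !decide (kv.1 ∈ olds.map Prod.fst))
        = news.filter (fun kv => !(oldD.contains kv.1)) :=
      List.filter_congr (fun kv _ => by
        simp [PySem.Dict.contains_eq_decide_mem_keys, hmo kv.1])
    rw [hpq]
    refine Eq.symm (PySem.List.sorted_eq_of_perm_of_pairwise_lt _ _ _ ?_ ?_)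
    · exact (hpn.filter _).map Prod.fst
    · exact List.pairwise_map.2 ((List.Pairwise.sublist List.filter_sublist hn))
  -- removed
  have e2 : (olds.filter (fun kv => !decide (kv.1 ∈ news.map Prod.fst))).map Prod.fst
      = PySem.List.sorted ((PySem.Dict.keys oldD).filter (fun k => !(newD.contains k))) (fun x => x) false := by
    have hkeys : (PySem.Dict.keys oldD).filter (fun k => !(newD.contains k))
        = (oldD.items.filter (fun kv => !(newD.contains kv.1))).map Prod.fst := by
      show (oldD.items.map Prod.fst).filter (fun k => !(newD.contains k)) = _
      rw [List.filter_map]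
      rfl
    rw [hkeys]
    have hpq : olds.filter (fun kv => !decide (kv.1 ∈ news.map Prod.fst))
        = olds.filter (fun kv => !(newD.contains kv.1)) :=
      List.filter_congr (fun kv _ => by
        simp [PySem.Dict.contains_eq_decide_mem_keys, hmn kv.1])
    rw [hpq]
    refine Eq.symm (PySem.List.sorted_eq_of_perm_of_pairwise_lt _ _ _ ?_ ?_)
    · exact (hpo.filter _).map Prod.fst
    · exact List.pairwise_map.2 ((List.Pairwise.sublist List.filter_sublist ho))
  -- changed
  have e3 : (news.filter (fun kv => ((List.lookup kv.1 olds).map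
        (fun vo => decide (pvGetHash vo ≠ pvGetHash kv.2))).getD false)).map Prod.fst
      = PySem.List.sorted ((newD.items.filter
          (fun kv => oldD.contains kv.1 && decide (pvGetHash (oldD.getD kv.1 []) ≠ pvGetHash kv.2))).map Prod.fst) (fun x => x) false := by
    have hpc : ∀ kv : String × List (String × String),
        (((List.lookup kv.1 olds).map (fun vo => decide (pvGetHash vo ≠ pvGetHash kv.2))).getD false)
        = (oldD.contains kv.1 && decide (pvGetHash (oldD.getD kv.1 []) ≠ pvGetHash kv.2)) := by
      intro kv
      by_cases hc : oldD.contains kv.1 = true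
      · have hsome : ∃ v, oldD.get? kv.1 = some v := by
          rw [PySem.Dict.contains_eq_isSome_get?] at hc
          exact Option.isSome_iff_exists.1 hc
        obtain ⟨v, hv⟩ := hsome
        have hmem : (kv.1, v) ∈ oldD.items := PySem.Dict.mem_items_of_get?_eq_some _ hv
        have hmemo : (kv.1, v) ∈ olds := hpo.mem_iff.2 hmem
        have hlook : List.lookup kv.1 olds = some v := (lookup_eq_some_iff olds _ _ hnodup_o).2 hmemo
        have hgd : oldD.getD kv.1 [] = v := PySem.Dict.getD_of_get?_eq_some _ _ hv
        rw [hlook, hgd, hc]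
        simp
      · have hb : oldD.contains kv.1 = false := by simpa using hc
        have hlook : List.lookup kv.1 olds = none := by
          cases hl : List.lookup kv.1 olds with
          | none => rfl
          | some v =>
            have hmemo := (lookup_eq_some_iff olds _ _ hnodup_o).1 hl
            have hmk : kv.1 ∈ PySem.Dict.keys oldD := (hmo kv.1).1 (List.mem_map.2 ⟨_, hmemo, rfl⟩)
            rw [PySem.Dict.contains_eq_decide_mem_keys] at hb
            simp [hmk] at hb
        rw [hlook, hb]
        simp
    have hpq : news.filter (fun kv => ((List.lookup kv.1 olds).map
          (fun vo => decide (pvGetHash vo ≠ pvGetHash kv.2))).getD false)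
        = news.filter (fun kv => oldD.contains kv.1 && decide (pvGetHash (oldD.getD kv.1 []) ≠ pvGetHash kv.2)) :=
      List.filter_congr (fun kv _ => hpc kv)
    rw [hpq]
    refine Eq.symm (PySem.List.sorted_eq_of_perm_of_pairwise_lt _ _ _ ?_ ?_)
    · exact (hpn.filter _).map Prod.fst
    · exact List.pairwise_map.2 ((List.Pairwise.sublist List.filter_sublist hn))
  rw [e1, e2, e3]

-- ===== VERDICT (by name: the statement is the Claim_ definition above) =====
theorem diff_index_py_spec : Claim_equal_diff_index_py := by
  intro old new _
  unfold Spec_diff_index_py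
  rw [a_eq_canon, b_eq_canon]
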